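-- pv_equiv track=rewrite | github.com/KhanhTheChau/elliptic-curve | test.py | encode_message_to_points
-- ===== SOURCE A (Python) =====
-- from collections import defaultdict
--
-- def quadratic_residues(n):
--     d = defaultdict(list)
--     for i in range(n):
--         r = pow(i, 2, n)
--         d[r].append(i)
--     return d
--
-- def find_points_on_curve(n, a, b):
--     residues = quadratic_residues(n)
--     points = []
--     for x in range(n):
--         rhs = (pow(x, 3, n) + a * x + b) % n
--         if rhs in residues:
--             for y in residues[rhs]:
--                 points.append((x, y))
--     return points
--
-- def encode_message_to_points(message, a, b, p):
--     all_points = find_points_on_curve(p, a, b)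
--     point_map = defaultdict(list)
--     for x, y in all_points:
--         point_map[x].append((x, y))
--     points = []
--     offsets = []
--     for char in message:
--         base_x = ord(char)
--         for offset in range(100):
--             x_try = (base_x + offset) % p
--             if point_map[x_try]:
--                 points.append(point_map[x_try][0])
--                 offsets.append(offset)
--                 break
--         else:
--             raise ValueError("Không tìm được điểm cho ký tự: " + char)
--     return points, offsets
-- ===== SOURCE B (Python) =====
-- def encode_message_to_points(message, a, b, p):
--     smallest_root = {}
--     for i in range(p):
--         r = pow(i, 2, p)
--         if r not in smallest_root:
--             smallest_root[r] = i
--     points = []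
--     offsets = []
--     for char in message:
--         base_x = ord(char)
--         for offset in range(100):
--             x_try = (base_x + offset) % p
--             rhs = (pow(x_try, 3, p) + a * x_try + b) % p
--             if rhs in smallest_root:
--                 points.append((x_try, smallest_root[rhs]))
--                 offsets.append(offset)
--                 break
--         else:
--             raise ValueError("Không tìm được điểm cho ký tự: " + char)
--     return points, offsets
-- ===== Notes on version B (the rewrite author's own statement) =====
-- stated objective: simpler
-- what changed: B drops find_points_on_curve/point_map entirely: one pass over range(p) records only the smallest square root of each quadratic residue, and curve membership is decided inside the per-character offset loop by a single dict lookup, instead of materialising every curve point and grouping them by x.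
import Mathlib
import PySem

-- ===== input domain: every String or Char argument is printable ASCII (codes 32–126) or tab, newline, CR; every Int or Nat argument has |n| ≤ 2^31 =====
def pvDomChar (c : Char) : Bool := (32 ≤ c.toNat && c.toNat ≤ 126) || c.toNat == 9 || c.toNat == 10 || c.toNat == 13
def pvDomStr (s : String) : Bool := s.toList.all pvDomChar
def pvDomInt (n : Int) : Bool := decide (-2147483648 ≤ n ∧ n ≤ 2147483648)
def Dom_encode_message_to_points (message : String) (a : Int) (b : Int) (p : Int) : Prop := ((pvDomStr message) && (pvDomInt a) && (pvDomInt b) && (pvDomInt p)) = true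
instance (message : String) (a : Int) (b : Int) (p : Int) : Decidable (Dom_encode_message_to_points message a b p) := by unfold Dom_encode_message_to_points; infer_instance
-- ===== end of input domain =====

-- B replaces A's full enumeration of curve points (find_points_on_curve + point_map) by a
-- single smallest-square-root dictionary consulted inside the offset loop (objective: simpler —
-- one helper and one table instead of three). Both programs raise ValueError on characters with
-- no point within 100 offsets (and on p = 0 / p < 0 with a nonempty message); Pre_ excludes those.
-- The Python dicts of both programs are used pointwise only (insert / lookup; never iterated),
-- so both ports realise them as Std.HashMap — exact for those operations and evaluable in
-- near-linear time where an association list would be quadratic in p.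

-- ===== PORT A =====
-- quadratic_residues(n): defaultdict(list), d[r].append(i)
def pvQuadRes (n : Int) : Std.HashMap Int (List Int) :=
  (PySem.List.pyRange 0 n 1).foldl
    (fun d i =>
      let r := PySem.Int.powMod i 2 n
      d.insert r (d.getD r [] ++ [i])) ∅

-- find_points_on_curve(n, a, b); points.append is O(1) in Python, so the growing list is an
-- Array built by push (same elements in the same order), read back with toList at the end
def pvFindPoints (n aa bb : Int) : List (Int × Int) :=
  let residues := pvQuadRes n
  ((PySem.List.pyRange 0 n 1).foldl
    (fun pts x =>
      let rhs := PySem.Int.mod (PySem.Int.powMod x 3 n + aa * x + bb) n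
      if residues.contains rhs then
        (residues.getD rhs []).foldl (fun pts y => pts.push (x, y)) pts
      else pts) (#[] : Array (Int × Int))).toList

-- the inner 'for offset in range(100): … break / else raise' loop of A; none = the raise path
def pvScanA (pm : Std.HashMap Int (List (Int × Int))) (p baseX : Int) :
    List Int → Option (Int × (Int × Int))
  | [] => none
  | off :: rest =>
    let xtry := PySem.Int.mod (baseX + off) p
    match pm.getD xtry [] with
    | [] => pvScanA pm p baseX rest
    | q :: _ => some (off, q)      -- point_map[x_try][0] under the nonemptiness guard

def encode_message_to_points (message : String) (a : Int) (b : Int) (p : Int) :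
    (List (Int × Int)) × List Int :=
  let all_points := pvFindPoints p a b
  let point_map := all_points.foldl
    (fun d q => d.insert q.1 (d.getD q.1 [] ++ [q])) (∅ : Std.HashMap Int (List (Int × Int)))
  message.toList.foldl
    (fun st c =>
      match pvScanA point_map p (c.toNat : Int) (PySem.List.pyRange 0 100 1) with
      | some (off, pt) => (st.1 ++ [pt], st.2 ++ [off])
      | none => st)                -- Python raises ValueError here; excluded by Pre_
    ([], [])

-- ===== PORT B =====
-- smallest_root: first (= smallest) square root of each quadratic residue mod p
def pvRootMap (p : Int) : Std.HashMap Int Int :=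
  (PySem.List.pyRange 0 p 1).foldl
    (fun d i =>
      let r := PySem.Int.powMod i 2 p
      if d.contains r then d else d.insert r i) ∅

-- B's inner offset loop: membership test folded into the character loop; none = the raise path
def pvScanB (root : Std.HashMap Int Int) (p aa bb baseX : Int) :
    List Int → Option (Int × (Int × Int))
  | [] => none
  | off :: rest =>
    let xtry := PySem.Int.mod (baseX + off) p
    let rhs := PySem.Int.mod (PySem.Int.powMod xtry 3 p + aa * xtry + bb) p
    match root[rhs]? with
    | some y => some (off, (xtry, y))
    | none => pvScanB root p aa bb baseX rest

def encode_message_to_points_alt (message : String) (a : Int) (b : Int) (p : Int) :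
    (List (Int × Int)) × List Int :=
  let root := pvRootMap p
  message.toList.foldl
    (fun st c =>
      match pvScanB root p a b (c.toNat : Int) (PySem.List.pyRange 0 100 1) with
      | some (off, pt) => (st.1 ++ [pt], st.2 ++ [off])
      | none => st)                -- raises ValueError in Source B; excluded by Pre_
    ([], [])

-- ===== PRECONDITION & SPEC =====
-- Helpers for deciding Pre_ fast: 'r is a square modulo n' by trial-division factorisation of n
-- and the standard square criterion modulo each prime power (Euler's criterion for odd q; the
-- mod-8 rule for q = 2), so Pre_ evaluates quickly even at p near 2^31.
-- modular exponentiation by squaring (fuel-bounded; fuel 40 covers every exponent < 2^31)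
def pvPowMod : Nat → Nat → Nat → Nat → Nat
  | 0, _, _, _ => 1
  | fuel+1, base, e, n =>
    if e = 0 then 1 % n
    else
      let h := pvPowMod fuel (base * base % n) (e / 2) n
      if e % 2 = 1 then h * base % n else h

-- (k, u) with r = q^k * u and q ∤ u (fuel 40 covers every r < 2^31, q ≥ 2)
def pvExtract : Nat → Nat → Nat → Nat × Nat
  | 0, _, r => (0, r)
  | fuel+1, q, r =>
    if 2 ≤ q ∧ 0 < r ∧ r % q = 0 then
      let ku := pvExtract fuel q (r / q)
      (ku.1 + 1, ku.2)
    else (0, r)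

-- smallest doubling ≥ √n (fuel 40 covers every n < 2^31; kernel-reducible, unlike Nat.sqrt)
def pvGrow : Nat → Nat → Nat → Nat
  | 0, _, acc => acc
  | fuel+1, n, acc => if n ≤ acc * acc then acc else pvGrow fuel n (2 * acc)

-- prime factorisation of n by trial division up to a bound ≥ √n, as (prime, multiplicity) pairs
def pvFactor (n : Nat) : List (Nat × Nat) :=
  let res := (List.range (pvGrow 40 n 1 + 2)).foldl
    (fun (st : Nat × List (Nat × Nat)) d =>
      if 2 ≤ d ∧ 2 ≤ st.1 ∧ st.1 % d = 0 then
        let km := pvExtract 40 d st.1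
        (km.2, st.2 ++ [(d, km.1)])
      else st) (n, [])
  if 2 ≤ res.1 then res.2 ++ [(res.1, 1)] else res.2

-- ∃ y, y² ≡ r (mod n), for n ≥ 1: squareness modulo every prime power of n (CRT)
def pvIsSquareMod (r n : Nat) : Bool :=
  (pvFactor n).all (fun qe =>
    let q := qe.1
    let e := qe.2
    let r0 := r % q ^ e
    if r0 = 0 then true
    else
      let ku := pvExtract 40 q r0
      if ku.1 % 2 = 1 then false
      else
        let m := e - ku.1
        if q = 2 then
          decide (m = 1 ∨ (m = 2 ∧ ku.2 % 4 = 1) ∨ (3 ≤ m ∧ ku.2 % 8 = 1))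
        else decide (pvPowMod 40 (ku.2 % q) ((q - 1) / 2) q = 1))

-- character c finds, within offsets 0..99, an x whose curve rhs is a square mod p
def pvCharOk (aa bb p : Int) (c : Char) : Bool :=
  (List.range 100).any (fun off =>
    let x := PySem.Int.mod ((c.toNat : Int) + (off : Int)) p
    pvIsSquareMod ((PySem.Int.mod (PySem.Int.powMod x 3 p + aa * x + bb) p).toNat) p.toNat)

-- Pre_ = exactly the inputs on which Python A returns: either the message is empty, or p ≥ 1 and
-- every character reaches, within offsets 0..99, an x whose curve rhs is a quadratic residue mod p;
-- outside these A raises (ValueError, or ZeroDivisionError when p = 0) and Source B raises there too.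
def Pre_encode_message_to_points (message : String) (a : Int) (b : Int) (p : Int) : Prop :=
  message.toList = [] ∨ (1 ≤ p ∧ message.toList.all (pvCharOk a b p) = true)
instance (message : String) (a : Int) (b : Int) (p : Int) :
    Decidable (Pre_encode_message_to_points message a b p) := by
  unfold Pre_encode_message_to_points; infer_instance

def pvWitness_encode_message_to_points : String × Int × Int × Int := ("A", 0, 1, 5)

def Spec_encode_message_to_points (message : String) (a : Int) (b : Int) (p : Int) (out : (List (Int × Int)) × List Int) : Prop := out = encode_message_to_points_alt message a b p
instance (message : String) (a : Int) (b : Int) (p : Int) (out : (List (Int × Int)) × List Int) : Decidable (Spec_encode_message_to_points message a b p out) := by unfold Spec_encode_message_to_points; infer_instance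

-- ===== CLAIM (what is proved, stated in full; the proofs are below) =====
def Claim_equal_encode_message_to_points : Prop := ∀ (message : String) (a : Int) (b : Int) (p : Int), Dom_encode_message_to_points message a b p → Pre_encode_message_to_points message a b p → Spec_encode_message_to_points message a b p (encode_message_to_points message a b p)
-- ===== LEMMAS AND PROOFS =====

-- the curve's right-hand side (pow(x,3,p) + a*x + b) % p, shared by both ports
def pvRhs (p a b x : Int) : Int :=
  PySem.Int.mod (PySem.Int.powMod x 3 p + a * x + b) p

-- B's first-insert loop: lookup = head of the filtered source list
theorem pvRootFold (f : Int → Int) (l : List Int) :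
    ∀ (d : Std.HashMap Int Int) (r : Int),
    ((l.foldl (fun d i => if d.contains (f i) then d else d.insert (f i) i) d))[r]?
      = (d[r]?).or ((l.filter (fun i => f i == r)).head?) := by
  induction l with
  | nil => intro d r; simp
  | cons i t ih =>
    intro d r
    simp only [List.foldl_cons, List.filter_cons]
    by_cases hc : d.contains (f i) = true
    · simp only [hc, if_true]
      rw [ih]
      by_cases hr : f i = r
      · have hs : (d[r]?).isSome := by
          rw [← hr, ← Std.HashMap.contains_eq_isSome_getElem?]; exact hc
        rcases Option.isSome_iff_exists.mp hs with ⟨v, hv⟩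
        simp [hv, hr, Option.or]
      · simp [show (f i == r) = false by simp [hr]]
    · simp only [Bool.not_eq_true] at hc
      simp only [hc, Bool.false_eq_true, if_false]
      rw [ih]
      by_cases hr : f i = r
      · have hn : d[r]? = none := by
          rw [← hr]
          rw [← Option.not_isSome_iff_eq_none, ← Std.HashMap.contains_eq_isSome_getElem?]
          simp [hc]
        rw [hr, Std.HashMap.getElem?_insert_self]
        simp [hn, Option.or]
      · rw [Std.HashMap.getElem?_insert]
        simp [show (f i == r) = false by simp [hr]]

-- a defaultdict(list)-grouping fold: getD = filter of the source list
theorem pvGroupFold {α : Type} (key : α → Int) (l : List α) :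
    ∀ (m : Std.HashMap Int (List α)) (x : Int),
    ((l.foldl (fun d q => d.insert (key q) (d.getD (key q) [] ++ [q])) m).getD x [])
      = m.getD x [] ++ l.filter (fun q => key q == x) := by
  induction l with
  | nil => intro m x; simp
  | cons q t ih =>
    intro m x
    simp only [List.foldl_cons, List.filter_cons]
    rw [ih, Std.HashMap.getD_insert]
    by_cases hq : key q = x
    · simp [hq]
    · simp [show (key q == x) = false by simp [hq]]

-- guarded-append fold = flatMap when the guard's failure means the block is empty
theorem pvFlatMapFold {α : Type} (g : Int → List α) (cond : Int → Bool)
    (hg : ∀ x, cond x = false → g x = []) (l : List Int) :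
    (l.foldl (fun pts x => if cond x then pts ++ g x else pts) ([] : List α))
      = l.flatMap g := by
  have h := PySem.List.foldl_congr_mem (l := l) (init := ([] : List α))
    (f := fun pts x => if cond x then pts ++ g x else pts)
    (g := fun pts x => pts ++ g x) ?_
  · rw [h, PySem.List.foldl_append_eq_flatMap]; simp
  · intro acc x _
    by_cases hc : cond x = true
    · simp [hc]
    · simp only [Bool.not_eq_true] at hc; simp [hc, hg x hc]

-- filtering a flatMap whose blocks are tagged by their generating index
theorem pvFilterFlatMap (l : List Int) (hl : l.Nodup) (g : Int → List (Int × Int))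
    (hg : ∀ x' q, q ∈ g x' → q.1 = x') (x : Int) :
    (l.flatMap g).filter (fun q => q.1 == x) = if x ∈ l then g x else [] := by
  induction l with
  | nil => simp
  | cons y t ih =>
    simp only [List.flatMap_cons, List.filter_append, List.nodup_cons] at hl ⊢
    rw [ih hl.2]
    by_cases hy : y = x
    · subst hy
      have h1 : (g y).filter (fun q => q.1 == y) = g y :=
        List.filter_eq_self.mpr (fun q hq => by simp [hg y q hq])
      simp [h1, hl.1]
    · have h1 : (g y).filter (fun q => q.1 == x) = [] :=
        List.filter_eq_nil_iff.mpr (fun q hq => by simp [hg y q hq, hy])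
      simp [h1, Ne.symm hy]

-- A's residue table, characterised
theorem pvQuadRes_getD (n r : Int) :
    (pvQuadRes n).getD r []
      = (PySem.List.pyRange 0 n 1).filter (fun i => PySem.Int.powMod i 2 n == r) := by
  have h := pvGroupFold (fun i => PySem.Int.powMod i 2 n) (PySem.List.pyRange 0 n 1)
    (∅ : Std.HashMap Int (List Int)) r
  simpa [pvQuadRes] using h

-- B's root table, characterised: head of A's residue list
theorem pvRootMap_get? (p r : Int) :
    (pvRootMap p)[r]? = ((pvQuadRes p).getD r []).head? := by
  rw [pvQuadRes_getD]
  have h := pvRootFold (fun i => PySem.Int.powMod i 2 p) (PySem.List.pyRange 0 p 1)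
    (∅ : Std.HashMap Int Int) r
  simpa [pvRootMap] using h

-- pushing each mapped element = appending the mapped list
theorem pvPushFold {α β : Type} (f : β → α) (ys : List β) :
    ∀ (acc : Array α), (ys.foldl (fun a y => a.push (f y)) acc).toList = acc.toList ++ ys.map f := by
  induction ys with
  | nil => intro acc; simp
  | cons y t ih => intro acc; simp

-- the Array-accumulated guarded fold, read back as the List-accumulated one
theorem pvArrFold (resid : Std.HashMap Int (List Int)) (rhsF : Int → Int) (l : List Int) :
    ∀ (acc : Array (Int × Int)),
    (l.foldl (fun pts x =>
        if resid.contains (rhsF x) then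
          (resid.getD (rhsF x) []).foldl (fun pts y => pts.push (x, y)) pts
        else pts) acc).toList
      = l.foldl (fun pts x =>
          if resid.contains (rhsF x) then
            pts ++ (resid.getD (rhsF x) []).map (fun y => (x, y))
          else pts) acc.toList := by
  induction l with
  | nil => intro acc; rfl
  | cons x t ih =>
    intro acc
    simp only [List.foldl_cons]
    by_cases hc : resid.contains (rhsF x) = true
    · simp only [hc, if_true]
      rw [ih, pvPushFold]
    · simp only [Bool.not_eq_true] at hc
      simp only [hc, Bool.false_eq_true, if_false]
      exact ih acc

-- A's point list as a flatMap
theorem pvFindPoints_eq (p a b : Int) :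
    pvFindPoints p a b
      = (PySem.List.pyRange 0 p 1).flatMap
          (fun x => ((pvQuadRes p).getD (pvRhs p a b x) []).map (fun y => (x, y))) := by
  unfold pvFindPoints pvRhs
  rw [pvArrFold (pvQuadRes p)
    (fun x => PySem.Int.mod (PySem.Int.powMod x 3 p + a * x + b) p) (PySem.List.pyRange 0 p 1)]
  exact pvFlatMapFold
    (g := fun x => ((pvQuadRes p).getD (PySem.Int.mod (PySem.Int.powMod x 3 p + a * x + b) p) []).map (fun y => (x, y)))
    (cond := fun x => (pvQuadRes p).contains (PySem.Int.mod (PySem.Int.powMod x 3 p + a * x + b) p))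
    (fun x hc => by
      simp only []
      rw [Std.HashMap.getD_eq_fallback_of_contains_eq_false hc]
      simp)
    (PySem.List.pyRange 0 p 1)

-- A's point_map, characterised
theorem pvPointMap_getD (p a b x : Int) :
    ((pvFindPoints p a b).foldl
        (fun d q => d.insert q.1 (d.getD q.1 [] ++ [q]))
        (∅ : Std.HashMap Int (List (Int × Int)))).getD x []
      = if x ∈ PySem.List.pyRange 0 p 1
        then ((pvQuadRes p).getD (pvRhs p a b x) []).map (fun y => (x, y)) else [] := by
  have h := pvGroupFold (fun q : Int × Int => q.1) (pvFindPoints p a b)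
    (∅ : Std.HashMap Int (List (Int × Int))) x
  rw [h, pvFindPoints_eq]
  have h2 := pvFilterFlatMap (PySem.List.pyRange 0 p 1) (PySem.List.nodup_pyRange_one 0 p)
    (fun x' => ((pvQuadRes p).getD (pvRhs p a b x') []).map (fun y => (x', y)))
    (fun x' q hq => by rcases List.mem_map.mp hq with ⟨y, _, rfl⟩; rfl) x
  simpa using h2

theorem pvScanEq (a b p base : Int) (offs : List Int) :
    pvScanA ((pvFindPoints p a b).foldl
        (fun d q => d.insert q.1 (d.getD q.1 [] ++ [q]))
        (∅ : Std.HashMap Int (List (Int × Int)))) p base offs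
      = pvScanB (pvRootMap p) p a b base offs := by
  induction offs with
  | nil => rfl
  | cons off rest ih =>
    rw [pvScanA, pvScanB, pvPointMap_getD, pvRootMap_get?]
    simp only [pvRhs]
    by_cases hp : 1 ≤ p
    · have hmem : PySem.Int.mod (base + off) p ∈ PySem.List.pyRange 0 p 1 :=
        PySem.List.mem_pyRange_one.mpr
          ⟨PySem.Int.mod_nonneg _ (by omega), PySem.Int.mod_lt _ (by omega)⟩
      rw [if_pos hmem]
      cases hys : (pvQuadRes p).getD
          (PySem.Int.mod (PySem.Int.powMod (PySem.Int.mod (base + off) p) 3 p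
            + a * PySem.Int.mod (base + off) p + b) p) [] with
      | nil => simpa using ih
      | cons y ys => simp
    · have hrange : PySem.List.pyRange 0 p 1 = [] := by
        rw [PySem.List.pyRange_one]
        simp only [List.map_eq_nil_iff, List.range_eq_nil]
        omega
      have hres : (pvQuadRes p).getD
          (PySem.Int.mod (PySem.Int.powMod (PySem.Int.mod (base + off) p) 3 p
            + a * PySem.Int.mod (base + off) p + b) p) [] = [] := by
        rw [pvQuadRes_getD, hrange]; rfl
      rw [hres, if_neg (by simp [hrange])]
      simpa using ih

-- ===== VERDICT (by name: the statement is the Claim_ definition above) =====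
theorem encode_message_to_points_spec : Claim_equal_encode_message_to_points := by
  intro message a b p _ _
  unfold Spec_encode_message_to_points
  simp only [encode_message_to_points, encode_message_to_points_alt]
  apply PySem.List.foldl_congr_mem
  intro st c _
  rw [pvScanEq]
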